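-- pv_equiv track=rewrite | github.com/Demfier/misc-fun-acts | vericent/consolidating_memory.py | min_partitions_alt
-- ===== SOURCE A (Python) =====
-- def min_partitions_alt(used, total):
--     total_memory_used = sum(used)
--     total.sort(reverse=True)
--     n = 0
--     for i in range(len(total)):
--         total_memory_used -= total[i]
--         if total_memory_used <= 0:
--             return n+1
--         n += 1
-- ===== SOURCE B (Python) =====
-- def min_partitions_alt(used, total):
--     # Selection by repeated max-extraction: no sorting at all.
--     # Note: unlike A (which sorts `total` in place), B leaves `total` unmodified.
--     remaining = sum(used)
--     pool = list(total)
--     taken = 0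
--     while pool:
--         biggest = max(pool)
--         pool.remove(biggest)
--         remaining -= biggest
--         taken += 1
--         if remaining <= 0:
--             return taken
--     return None
-- ===== Notes on version B (the rewrite author's own statement) =====
-- stated objective: alternative
-- what changed: Replaces sort-then-scan by repeated max-extraction from a working pool (selection without sorting): each step removes the current maximum and decrements the remaining threshold; also B does not mutate `total` (A sorts it in place).
import Mathlib
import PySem

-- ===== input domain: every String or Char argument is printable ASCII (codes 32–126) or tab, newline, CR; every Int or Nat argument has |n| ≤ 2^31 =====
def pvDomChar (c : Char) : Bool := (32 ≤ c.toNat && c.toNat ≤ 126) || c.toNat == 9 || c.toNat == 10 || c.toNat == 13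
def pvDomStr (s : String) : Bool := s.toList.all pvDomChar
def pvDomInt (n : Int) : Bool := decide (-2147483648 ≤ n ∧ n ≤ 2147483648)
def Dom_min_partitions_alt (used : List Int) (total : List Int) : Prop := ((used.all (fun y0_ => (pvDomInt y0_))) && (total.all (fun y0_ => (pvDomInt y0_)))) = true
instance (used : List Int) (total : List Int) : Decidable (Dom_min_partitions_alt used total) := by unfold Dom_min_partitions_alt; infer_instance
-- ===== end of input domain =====

-- B replaces A's sort-then-scan by repeated max-extraction from a working pool (selection
-- without sorting); same return value. A sorts `total` in place, B does not mutate it: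
-- the equivalence proved here is about the return value only.
-- ===== PORT A =====
-- the for-loop over range(len(total)) with early return, state = (total_memory_used, n)
def pvALoop (t : List Int) (tmu : Int) (n : Int) : Option Int :=
  match t with
  | [] => none
  | x :: rest =>
    let tmu' := tmu - x
    if tmu' ≤ 0 then some (n + 1) else pvALoop rest tmu' (n + 1)

def min_partitions_alt (used : List Int) (total : List Int) : Option Int :=
  pvALoop (PySem.List.sorted total (fun x => x) true) (used.sum) 0

-- ===== PORT B =====
-- the while-loop: pop max(pool), decrement remaining, count; None when pool exhausts
def pvGrab (pool : List Int) (remaining : Int) (taken : Int) : Option Int :=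
  match h : PySem.List.max? pool (fun x => x) with
  | none => none
  | some m =>
    if remaining - m ≤ 0 then some (taken + 1)
    else pvGrab (pool.erase m) (remaining - m) (taken + 1)
termination_by pool.length
decreasing_by
  have h1 := List.length_erase_of_mem (PySem.List.max?_mem h)
  have h2 := List.length_pos_of_mem (PySem.List.max?_mem h)
  omega

def min_partitions_alt_alt (used : List Int) (total : List Int) : Option Int :=
  pvGrab total (used.sum) 0

-- ===== PRECONDITION & SPEC =====
def Spec_min_partitions_alt (used : List Int) (total : List Int) (out : Option Int) : Prop := out = min_partitions_alt_alt used total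
instance (used : List Int) (total : List Int) (out : Option Int) : Decidable (Spec_min_partitions_alt used total out) := by unfold Spec_min_partitions_alt; infer_instance

-- ===== CLAIM =====
def Claim_equal_min_partitions_alt : Prop := ∀ (used : List Int) (total : List Int), Dom_min_partitions_alt used total → Spec_min_partitions_alt used total (min_partitions_alt used total)

-- ===== LEMMAS AND PROOFS =====
-- descending sort decomposes as: first maximum, then descending sort of the rest
theorem sorted_rev_eq_max_cons (pool : List Int) (m : Int)
    (h : PySem.List.max? pool (fun x => x) = some m) :
    PySem.List.sorted pool (fun x => x) true =
      m :: PySem.List.sorted (pool.erase m) (fun x => x) true := by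
  have hm : m ∈ pool := PySem.List.max?_mem h
  refine List.Perm.eq_of_pairwise (le := fun a b : Int => b ≤ a)
    (fun a b _ _ hab hba => le_antisymm hba hab)
    (PySem.List.sorted_pairwise_rev ..)
    ?_
    (((PySem.List.sorted_perm ..).trans (List.perm_cons_erase hm)).trans
      ((List.Perm.cons m (PySem.List.sorted_perm ..)).symm))
  refine List.Pairwise.cons ?_ (PySem.List.sorted_pairwise_rev ..)
  intro y hy
  have : y ∈ pool := List.mem_of_mem_erase ((PySem.List.mem_sorted ..).mp hy)
  exact PySem.List.max?_isMax h y this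

theorem grab_eq_aloop (k : Nat) (pool : List Int) (hk : pool.length ≤ k) (thr n : Int) :
    pvGrab pool thr n = pvALoop (PySem.List.sorted pool (fun x => x) true) thr n := by
  induction k generalizing pool thr n with
  | zero =>
    have : pool = [] := List.eq_nil_of_length_eq_zero (Nat.le_zero.mp hk)
    subst this
    rw [(PySem.List.sorted_eq_nil_iff ..).mpr rfl, pvGrab]
    rfl
  | succ k ih =>
    rw [pvGrab]
    cases h : PySem.List.max? pool (fun x => x) with
    | none =>
      have : pool = [] := (PySem.List.max?_eq_none_iff ..).mp h
      subst this
      rw [(PySem.List.sorted_eq_nil_iff ..).mpr rfl]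
      rfl
    | some m =>
      rw [sorted_rev_eq_max_cons pool m h]
      simp only [pvALoop]
      split
      · rfl
      · refine ih (pool.erase m) ?_ (thr - m) (n + 1)
        have hm : m ∈ pool := PySem.List.max?_mem h
        have := List.length_erase_of_mem hm
        omega

-- ===== VERDICT =====
theorem min_partitions_alt_spec : Claim_equal_min_partitions_alt := by
  intro used total _
  unfold Spec_min_partitions_alt min_partitions_alt min_partitions_alt_alt
  exact (grab_eq_aloop total.length total le_rfl used.sum 0).symm
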